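-- pv_equiv track=rewrite | github.com/Marco9723/Hooktheory_to_kern_converter | beams.py | beamable
-- ===== SOURCE A (Python) =====
-- def is_rest(tok: str):
--     clean = tok.lstrip('[') # otherwise isdigit() doesn't work
--     idx = 0 # from zero!
--
--     # check the token without [
--     # if is a digit or a simble like . or %
--     # keep going until i'm reading the numeric part of the token duration
--     while idx < len(clean) and (clean[idx].isdigit() or clean[idx] in '.%'):
--         idx += 1
--
--     # true if the token is a pause, has r after the numeric part
--     # if r is the las one, index is 1 less than the position of the rest r
--     if idx < len(clean) and clean[idx] == 'r':
--          return True
--     else:  # this does not happen if there is no r, no rest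
--         return False
--
-- def beamable(tok: str):
--     # kern duration >= 8 (eighth note or shorter) and is not a rest
--     clean = tok.lstrip('[')
--     digits = ''
--     # if it is a number (stop as soon as you find something that isn't a number)
--     for ch in clean:
--         if ch.isdigit():
--             digits += ch
--         else:
--             break
--
--     if digits:
--         duration_value = int(digits)
--     else:
--         duration_value = None
--
--     if duration_value is not None and duration_value >= 8 and not is_rest(tok):
--         return True
--     else:
--         return False
-- ===== SOURCE B (Python) =====
-- def beamable(tok: str):
--     # single DFA pass with an arithmetic accumulator: no digit string is built,
--     # no int() call, no separate rest helper re-scanning the token.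
--     # state 0: stripping leading '['; state 1: leading digits (value accumulated
--     # arithmetically); state 2: trailing digit/'.'/'%' run of is_rest's scan.
--     state, val, saw_digit, rest = 0, 0, False, False
--     for ch in tok:
--         if state == 0:
--             if ch == '[':
--                 continue
--             state = 1
--         if state == 1:
--             if ch.isdigit():
--                 val = val * 10 + ord(ch) - 48
--                 saw_digit = True
--                 continue
--             state = 2
--         if ch.isdigit() or ch in '.%':
--             continue
--         rest = (ch == 'r')
--         break
--     return saw_digit and val >= 8 and not rest
-- ===== Notes on version B (the rewrite author's own statement) =====
-- stated objective: alternative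
-- what changed: Replaces A's staged design (strip brackets, build a digit substring, call int() on it, then a separate is_rest helper that re-strips and re-scans the whole token) by a single-pass three-state DFA over the raw token that accumulates the duration arithmetically (val*10+digit) and detects the rest marker in the same scan, never building a string or calling int().
import Mathlib
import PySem

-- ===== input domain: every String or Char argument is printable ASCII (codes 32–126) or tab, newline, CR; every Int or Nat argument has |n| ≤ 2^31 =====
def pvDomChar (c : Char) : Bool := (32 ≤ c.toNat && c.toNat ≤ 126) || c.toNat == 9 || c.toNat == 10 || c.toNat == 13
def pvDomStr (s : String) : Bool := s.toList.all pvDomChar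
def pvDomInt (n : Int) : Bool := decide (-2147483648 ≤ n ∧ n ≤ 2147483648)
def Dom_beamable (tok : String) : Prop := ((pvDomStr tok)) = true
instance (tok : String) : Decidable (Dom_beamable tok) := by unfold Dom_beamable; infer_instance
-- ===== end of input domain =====

-- B replaces A's staged parse (digit substring + int() + separate is_rest rescans)
-- by one three-state DFA pass with an arithmetic accumulator (objective: alternative, same O(n)).

-- ===== PORT A =====
-- 'for ch in clean: if ch.isdigit(): digits += ch else: break' — the digit-collecting loop with break
def pvDigitsA : List Char → List Char
  | [] => []
  | c :: cs => if PySem.Chars.isdigit c then c :: pvDigitsA cs else []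

-- is_rest's while loop: skip while digit or in '.%', then test the stopping char against 'r'
-- ('ch in '.%'' for a single char is exactly ch = '.' ∨ ch = '%')
def pvRestScanA : List Char → Bool
  | [] => false                      -- idx reached len(clean): no 'r' found
  | c :: cs =>
    if PySem.Chars.isdigit c || (c == '.' || c == '%') then pvRestScanA cs
    else c == 'r'

-- tok.lstrip('[') is exactly dropping the leading run of '[' characters
def is_rest (tok : String) : Bool :=
  pvRestScanA (tok.toList.dropWhile (· == '['))

-- int(digits): exact hand-port for this call site — 'digits' is always a nonempty run of
-- ASCII '0'-'9' (built by the digit loop, int() only called when nonempty), and on such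
-- strings Python's int is exactly this left-to-right decimal fold (no sign/space/'_' occurs).
def pvIntOfDigits (ds : List Char) : Int :=
  ds.foldl (fun a c => a * 10 + ((c.toNat : Int) - 48)) 0

def beamable (tok : String) : Bool :=
  let clean := tok.toList.dropWhile (· == '[')   -- tok.lstrip('[')
  let digits := pvDigitsA clean
  let duration? : Option Int :=
    if digits.isEmpty then none else some (pvIntOfDigits digits)   -- int(digits) when digits nonempty
  match duration? with
  | some d => decide (8 ≤ d) && !(is_rest tok)
  | none => false

-- ===== PORT B =====
-- B's for-loop as a recursion over the characters with the loop state (state, val, saw_digit);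
-- the if-fall-throughs ('state = 1' then the state-1 test, 'state = 2' then the state-2 test)
-- are flattened into the guard conditions; 'break' returns the final (val, saw_digit, rest).
def pvLoopB : List Char → Nat → Int → Bool → Int × Bool × Bool
  | [], _, val, saw => (val, saw, false)
  | c :: cs, st, val, saw =>
    if st == 0 && c == '[' then pvLoopB cs 0 val saw
    else if (st == 0 || st == 1) && PySem.Chars.isdigit c then
      pvLoopB cs 1 (val * 10 + ((c.toNat : Int) - 48)) true
    else if PySem.Chars.isdigit c || c == '.' || c == '%' then
      pvLoopB cs 2 val saw
    else (val, saw, c == 'r')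

def beamable_alt (tok : String) : Bool :=
  match pvLoopB tok.toList 0 0 false with
  | (val, saw, rest) => saw && decide (8 ≤ val) && !rest

-- ===== PRECONDITION & SPEC =====
def Spec_beamable (tok : String) (out : Bool) : Prop := out = beamable_alt tok
instance (tok : String) (out : Bool) : Decidable (Spec_beamable tok out) := by unfold Spec_beamable; infer_instance

-- ===== CLAIM (what is proved, stated in full; the proofs are below) =====
def Claim_equal_beamable : Prop := ∀ (tok : String), Dom_beamable tok → Spec_beamable tok (beamable tok)

-- ===== LEMMAS AND PROOFS =====

-- state 0 strips exactly the leading '[' run and hands the rest to state 1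
lemma pvLoopB_strip (l : List Char) (v : Int) (s : Bool) :
    pvLoopB l 0 v s = pvLoopB (l.dropWhile (· == '[')) 1 v s := by
  induction l with
  | nil => rfl
  | cons c cs ih =>
    by_cases h : c == '['
    · simpa [pvLoopB, h] using ih
    · have h' : (c == '[') = false := by simpa using h
      simp [pvLoopB, h']

-- state 1 folds the leading digit run into val, sets saw_digit iff it is nonempty,
-- and continues in state 2 on the remaining suffix
lemma pvLoopB_num (l : List Char) (v : Int) (s : Bool) :
    pvLoopB l 1 v s =
      pvLoopB (l.dropWhile PySem.Chars.isdigit) 2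
        ((l.takeWhile PySem.Chars.isdigit).foldl (fun a c => a * 10 + ((c.toNat : Int) - 48)) v)
        (s || !(l.takeWhile PySem.Chars.isdigit).isEmpty) := by
  induction l generalizing v s with
  | nil => simp [pvLoopB]
  | cons c cs ih =>
    by_cases h : PySem.Chars.isdigit c
    · simp only [List.takeWhile_cons, List.dropWhile_cons, h]
      rw [show pvLoopB (c :: cs) 1 v s = pvLoopB cs 1 (v * 10 + ((c.toNat : Int) - 48)) true by
        simp [pvLoopB, h]]
      rw [ih]
      simp
    · simp only [List.takeWhile_cons, List.dropWhile_cons, h, Bool.false_eq_true, if_false]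
      simp [pvLoopB, h]

-- state 2 is exactly is_rest's scan: val and saw_digit are frozen, the scan yields rest
lemma pvLoopB_sym (l : List Char) (v : Int) (s : Bool) :
    pvLoopB l 2 v s = (v, s, pvRestScanA l) := by
  induction l with
  | nil => rfl
  | cons c cs ih =>
    by_cases h : PySem.Chars.isdigit c || (c == '.' || c == '%')
    · have h' : (PySem.Chars.isdigit c || c == '.' || c == '%') = true := by
        simpa [Bool.or_assoc] using h
      simp [pvLoopB, pvRestScanA, h, h', ih]
    · have h' : (PySem.Chars.isdigit c || c == '.' || c == '%') = false := by
        simpa [Bool.or_assoc] using h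
      simp [pvLoopB, pvRestScanA, h, h']

-- A's digit loop is takeWhile isdigit
lemma pvDigitsA_eq_takeWhile (l : List Char) :
    pvDigitsA l = l.takeWhile PySem.Chars.isdigit := by
  induction l with
  | nil => rfl
  | cons c cs ih =>
    simp only [pvDigitsA, List.takeWhile_cons]
    split_ifs with h <;> simp [ih]

-- is_rest's scan ignores the leading digit run (digits satisfy its skip condition)
lemma pvRestScanA_dropWhile_digits (l : List Char) :
    pvRestScanA (l.dropWhile PySem.Chars.isdigit) = pvRestScanA l := by
  induction l with
  | nil => rfl
  | cons c cs ih =>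
    by_cases h : PySem.Chars.isdigit c
    · simpa [List.dropWhile_cons, pvRestScanA, h] using ih
    · simp [h]

lemma beamable_eq_alt (tok : String) : beamable tok = beamable_alt tok := by
  unfold beamable beamable_alt is_rest pvIntOfDigits
  dsimp only
  rw [pvLoopB_strip, pvLoopB_num, pvLoopB_sym, pvRestScanA_dropWhile_digits]
  set clean := tok.toList.dropWhile (· == '[') with hclean
  rw [pvDigitsA_eq_takeWhile]
  by_cases hnil : (clean.takeWhile PySem.Chars.isdigit).isEmpty
  · simp [hnil]
  · have h' : (clean.takeWhile PySem.Chars.isdigit).isEmpty = false := by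
      simpa using hnil
    simp [h']

-- ===== VERDICT (by name: the statement is the Claim_ definition above) =====
theorem beamable_spec : Claim_equal_beamable := by
  intro tok _
  unfold Spec_beamable
  exact beamable_eq_alt tok
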